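-- pv_equiv track=rewrite | github.com/Helen962/Columns-Game | project5_logic.py | determine_match_dia_right_down
-- ===== SOURCE A (Python) =====
-- def determine_match_dia_right_down(board:[[]],orow:int,ocol:int)->list:
--     '''find match that is in the diagonal right down direction'''
--     row = len(board[0])
--     col = len(board)
--     r_list = []
--     i = ocol
--     j = orow
--     r_list.append((ocol,orow))
--     count = orow
--     times = ocol
--     for count in range(orow,row-1):
--         for times in range(1,(col)//3):
--             if i+3 < col and j +1 <= row - 1:
--                 num = board[i][j]
--                 num1 = board[i+3][j+1]
--                 if num == num1 and num != 0 :
--                     r_list.append((i+3,j+1))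
--                     i = i + 3
--                     j = j + 1
--                     count += 1
--                     times += 1
--                 else:
--                     None
--             else:
--                 None
--     return r_list
-- ===== SOURCE B (Python) =====
-- def determine_match_dia_right_down(board, orow, ocol):
--     '''find match that is in the diagonal right down direction'''
--     row = len(board[0])
--     col = len(board)
--     r_list = [(ocol, orow)]
--     # A's nested ranges matter only through whether their body runs at all (the
--     # walk stalls after the first failed comparison); the inner range(1, col//3)
--     # is nonempty exactly when col//3 >= 2, and then the budget always covers
--     # the whole run, so a single direct walk of the diagonal is equivalent.
--     if col // 3 >= 2:
--         i = ocol
--         j = orow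
--         while i + 3 < col and j + 1 <= row - 1 \
--                 and board[i][j] == board[i + 3][j + 1] != 0:
--             i += 3
--             j += 1
--             r_list.append((i, j))
--     return r_list
-- ===== Notes on version B (the rewrite author's own statement) =====
-- stated objective: alternative
-- what changed: Replaced A's nested for-loops over range(orow,row-1) x range(1,col//3) (whose bodies are no-ops once the walk stalls) by a single while loop that walks the diagonal and stops at the first mismatch or bound, run under the same non-emptiness condition col//3 >= 2 as A's inner range.
-- outside the precondition, e.g. on determine_match_dia_right_down([[1, 2], [7], [0, 0], [5, 6], [0, 0], [0, 0]], 0, 0): A returns [(0, 0)], B returns [(0, 0)]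
import Mathlib
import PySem

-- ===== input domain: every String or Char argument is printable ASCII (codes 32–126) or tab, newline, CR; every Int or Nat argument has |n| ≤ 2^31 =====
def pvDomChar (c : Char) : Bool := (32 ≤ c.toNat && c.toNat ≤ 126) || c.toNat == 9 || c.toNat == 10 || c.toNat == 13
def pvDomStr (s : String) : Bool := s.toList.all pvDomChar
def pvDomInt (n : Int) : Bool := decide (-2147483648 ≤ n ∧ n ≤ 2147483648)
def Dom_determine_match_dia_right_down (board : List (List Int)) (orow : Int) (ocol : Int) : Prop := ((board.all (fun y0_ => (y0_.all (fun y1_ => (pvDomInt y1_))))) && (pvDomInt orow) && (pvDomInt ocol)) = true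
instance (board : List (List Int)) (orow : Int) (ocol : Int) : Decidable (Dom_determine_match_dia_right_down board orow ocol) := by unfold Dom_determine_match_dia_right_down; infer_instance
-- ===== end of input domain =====

-- B replaces A's nested for-loops (whose bodies are no-ops once the diagonal walk stalls) by a single
-- while loop walking the run, guarded by the same non-emptiness condition col//3 >= 2 as A's inner range;
-- a genuinely different loop structure of similar cost (a timing run reported no speed-up).


-- shared input inspection (both Pythons start with the same two len() calls and index board the same way):
-- row = len(board[0]) (board nonempty inside Pre_), col = len(board), and Python's board[i][j]
-- (negative indices wrap; the defaults are never hit inside Pre_, where every access is in range)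
def pvRow (board : List (List Int)) : Int := ((board.headD []).length : Int)
def pvCol (board : List (List Int)) : Int := (board.length : Int)
def pvCell (board : List (List Int)) (i j : Int) : Int :=
  (PySem.List.pyGet? ((PySem.List.pyGet? board i).getD []) j).getD 0

-- ===== PORT A =====
-- one pass of A's (loop-variable-independent) inner-loop body over the mutable state (r_list, i, j);
-- num / num1 are inlined as pvCell board i j / pvCell board (i+3) (j+1)
def pvStepA (board : List (List Int)) (col row : Int)
    (st : List (Int × Int) × Int × Int) : List (Int × Int) × Int × Int :=
  match st with
  | (r_list, i, j) =>
    if i + 3 < col ∧ j + 1 ≤ row - 1 then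
      if pvCell board i j = pvCell board (i + 3) (j + 1) ∧ pvCell board i j ≠ 0 then
        (r_list ++ [(i + 3, j + 1)], i + 3, j + 1)
      else (r_list, i, j)
    else (r_list, i, j)

def determine_match_dia_right_down (board : List (List Int)) (orow : Int) (ocol : Int) : List (Int × Int) :=
  ((PySem.List.pyRange orow (pvRow board - 1) 1).foldl
      (fun st _ =>
        (PySem.List.pyRange 1 (PySem.Int.floordiv (pvCol board) 3) 1).foldl
          (fun st' _ => pvStepA board (pvCol board) (pvRow board) st') st)
      ([(ocol, orow)], ocol, orow)).1

-- ===== PORT B =====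
-- the while loop of Source B; the Nat fuel only makes the recursion structural: it is (row-1-j).toNat at
-- entry and stays exactly that along the walk (the guard j+1 ≤ row-1 keeps it positive), so it never truncates
def pvWalkB (board : List (List Int)) (col row : Int) : Nat → Int → Int → List (Int × Int)
  | 0, _, _ => []
  | f + 1, i, j =>
    if i + 3 < col ∧ j + 1 ≤ row - 1 ∧ pvCell board i j = pvCell board (i + 3) (j + 1) ∧ pvCell board i j ≠ 0 then
      (i + 3, j + 1) :: pvWalkB board col row f (i + 3) (j + 1)
    else []

def determine_match_dia_right_down_alt (board : List (List Int)) (orow : Int) (ocol : Int) : List (Int × Int) :=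
  if 2 ≤ PySem.Int.floordiv (pvCol board) 3 then
    (ocol, orow) :: pvWalkB board (pvCol board) (pvRow board) (pvRow board - 1 - orow).toNat ocol orow
  else [(ocol, orow)]

-- ===== PRECONDITION & SPEC =====
-- Pre_ excludes: the empty board (both programs raise IndexError on board[0]); and, when col ≥ 6 and the
-- first diagonal step (ocol,orow)->(ocol+3,orow+1) is in frame (both programs then walk and index the board
-- identically), ragged boards and start coordinates below -len, where the walk can raise IndexError mid-run.
def Pre_determine_match_dia_right_down (board : List (List Int)) (orow : Int) (ocol : Int) : Prop :=
  board ≠ [] ∧ ((6 ≤ board.length ∧ ocol + 3 < pvCol board ∧ orow + 1 ≤ pvRow board - 1) →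
    ((∀ r ∈ board, r.length = (board.headD []).length) ∧ -pvCol board ≤ ocol ∧ -pvRow board ≤ orow))
instance (board : List (List Int)) (orow : Int) (ocol : Int) : Decidable (Pre_determine_match_dia_right_down board orow ocol) := by unfold Pre_determine_match_dia_right_down; infer_instance

def pvWitness_determine_match_dia_right_down : List (List Int) × Int × Int :=
  ([[7, 2, 3], [0, 0, 0], [0, 0, 0], [0, 7, 0], [0, 0, 0], [0, 0, 0], [5, 9, 7]], 0, 0)

def Spec_determine_match_dia_right_down (board : List (List Int)) (orow : Int) (ocol : Int) (out : List (Int × Int)) : Prop := out = determine_match_dia_right_down_alt board orow ocol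
instance (board : List (List Int)) (orow : Int) (ocol : Int) (out : List (Int × Int)) : Decidable (Spec_determine_match_dia_right_down board orow ocol out) := by unfold Spec_determine_match_dia_right_down; infer_instance

-- ===== CLAIM (what is proved, stated in full; the proofs are below) =====
def Claim_equal_determine_match_dia_right_down : Prop := ∀ (board : List (List Int)) (orow : Int) (ocol : Int), Dom_determine_match_dia_right_down board orow ocol → Pre_determine_match_dia_right_down board orow ocol → Spec_determine_match_dia_right_down board orow ocol (determine_match_dia_right_down board orow ocol)

-- ===== LEMMAS AND PROOFS =====

-- a foldl that ignores the list elements is an iterate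
theorem pv_foldl_const_iterate {σ α : Type} (f : σ → σ) (l : List α) (st : σ) :
    l.foldl (fun s _ => f s) st = f^[l.length] st := by
  induction l generalizing st with
  | nil => rfl
  | cons x xs ih => simp [List.foldl_cons, ih, Function.iterate_succ_apply]

-- enough iterations of A's no-op-after-stop body produce exactly B's walk appended to the accumulator
theorem pv_iterate_eq_walk (board : List (List Int)) (col row : Int) :
    ∀ (n f : Nat) (i j : Int) (acc : List (Int × Int)),
      (row - 1 - j).toNat ≤ f →
      (pvWalkB board col row f i j).length ≤ n →
      ((pvStepA board col row)^[n] (acc, i, j)).1 = acc ++ pvWalkB board col row f i j := by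
  intro n
  induction n with
  | zero =>
    intro f i j acc _ hlen
    have : pvWalkB board col row f i j = [] := List.length_eq_zero_iff.mp (Nat.le_zero.mp hlen)
    simp [this]
  | succ n ih =>
    intro f i j acc hf hlen
    rw [Function.iterate_succ_apply]
    match f with
    | 0 =>
      -- fuel 0 means j+1 > row-1, so A's guard fails too and the state is fixed
      have hj : ¬ (i + 3 < col ∧ j + 1 ≤ row - 1) := by omega
      have hstep : pvStepA board col row (acc, i, j) = (acc, i, j) := by
        simp only [pvStepA]; rw [if_neg hj]
      rw [hstep]
      have h0 : (pvWalkB board col row 0 i j).length ≤ n := by simp [pvWalkB]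
      simpa [pvWalkB] using ih 0 i j acc (by omega) h0
    | f + 1 =>
      by_cases hg : i + 3 < col ∧ j + 1 ≤ row - 1 ∧
          pvCell board i j = pvCell board (i + 3) (j + 1) ∧ pvCell board i j ≠ 0
      · have hstep : pvStepA board col row (acc, i, j) =
            (acc ++ [(i + 3, j + 1)], i + 3, j + 1) := by
          simp only [pvStepA]
          rw [if_pos ⟨hg.1, hg.2.1⟩, if_pos ⟨hg.2.2.1, hg.2.2.2⟩]
        rw [hstep]
        have hw : pvWalkB board col row (f + 1) i j =
            (i + 3, j + 1) :: pvWalkB board col row f (i + 3) (j + 1) := by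
          simp only [pvWalkB]; rw [if_pos hg]
        rw [hw] at hlen ⊢
        have := ih f (i + 3) (j + 1) (acc ++ [(i + 3, j + 1)]) (by omega)
          (by simpa using Nat.lt_succ_iff.mp (Nat.lt_of_lt_of_le (Nat.lt_succ_self _) hlen))
        simpa [List.append_assoc] using this
      · have hw : pvWalkB board col row (f + 1) i j = [] := by
          simp only [pvWalkB]; rw [if_neg hg]
        have hstep : pvStepA board col row (acc, i, j) = (acc, i, j) := by
          simp only [pvStepA]
          by_cases hb : i + 3 < col ∧ j + 1 ≤ row - 1
          · have hcells : ¬ (pvCell board i j = pvCell board (i + 3) (j + 1) ∧ pvCell board i j ≠ 0) := by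
              tauto
            rw [if_pos hb, if_neg hcells]
          · rw [if_neg hb]
        rw [hstep, hw]
        simpa [hw] using ih (f + 1) i j acc hf (by simp [hw])

-- the walk is no longer than its fuel
theorem pv_walk_len_le (board : List (List Int)) (col row : Int) :
    ∀ (f : Nat) (i j : Int), (pvWalkB board col row f i j).length ≤ f := by
  intro f
  induction f with
  | zero => intro i j; simp [pvWalkB]
  | succ f ih =>
    intro i j
    by_cases hg : i + 3 < col ∧ j + 1 ≤ row - 1 ∧
        pvCell board i j = pvCell board (i + 3) (j + 1) ∧ pvCell board i j ≠ 0
    · have hw : pvWalkB board col row (f + 1) i j =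
          (i + 3, j + 1) :: pvWalkB board col row f (i + 3) (j + 1) := by
        simp only [pvWalkB]; rw [if_pos hg]
      rw [hw]
      simpa using ih (i + 3) (j + 1)
    · have hw : pvWalkB board col row (f + 1) i j = [] := by
        simp only [pvWalkB]; rw [if_neg hg]
      simp [hw]

-- A's inner iteration count col//3 - 1 as a Nat
theorem pv_k_len (board : List (List Int)) :
    (PySem.Int.floordiv (pvCol board) 3 - 1).toNat = (board.length / 3 - 1 : Nat) := by
  have hfd : PySem.Int.floordiv (pvCol board) 3 = ((board.length / 3 : Nat) : Int) := by
    unfold pvCol; exact_mod_cast PySem.Int.floordiv_natCast board.length 3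
  rw [hfd]; omega

-- B's guard col//3 >= 2 is exactly 'the board has at least 6 columns'
theorem pv_guard_iff (board : List (List Int)) :
    (2 ≤ PySem.Int.floordiv (pvCol board) 3) ↔ 6 ≤ board.length := by
  have hfd : PySem.Int.floordiv (pvCol board) 3 = ((board.length / 3 : Nat) : Int) := by
    unfold pvCol; exact_mod_cast PySem.Int.floordiv_natCast board.length 3
  rw [hfd]; omega

-- the core equivalence (it holds for the ports on every input)
theorem pv_main (board : List (List Int)) (orow ocol : Int) :
    determine_match_dia_right_down board orow ocol =
      determine_match_dia_right_down_alt board orow ocol := by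
  unfold determine_match_dia_right_down determine_match_dia_right_down_alt
  simp only [pv_foldl_const_iterate, ← Function.iterate_mul,
    PySem.List.length_pyRange_one, pv_k_len]
  set row : Int := pvRow board with hrow
  set col : Int := pvCol board with hcol
  set m : Nat := (row - 1 - orow).toNat with hm
  set k : Nat := (board.length / 3 - 1 : Nat) with hk
  by_cases hc6 : 6 ≤ board.length
  · -- at least one inner iteration per outer pass: the budget m*k covers the whole walk
    rw [if_pos (pv_guard_iff board |>.mpr hc6)]
    have hk1 : 1 ≤ k := by rw [hk]; omega
    have hwalk : (pvWalkB board col row m ocol orow).length ≤ k * m := by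
      calc (pvWalkB board col row m ocol orow).length
          ≤ m := pv_walk_len_le board col row m ocol orow
        _ ≤ k * m := Nat.le_mul_of_pos_left m hk1
    have := pv_iterate_eq_walk board col row (k * m) m ocol orow
      [(ocol, orow)] (le_refl _) hwalk
    simp [this]
  · -- fewer than 6 columns: A's inner range is empty and B's guard fails, both keep the singleton
    rw [if_neg (fun h => hc6 ((pv_guard_iff board).mp h))]
    have hk0 : k = 0 := by rw [hk]; omega
    rw [hk0]
    simp

-- ===== VERDICT (by name: the statement is the Claim_ definition above) =====
theorem determine_match_dia_right_down_spec : Claim_equal_determine_match_dia_right_down := by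
  intro board orow ocol _hdom _hpre
  exact pv_main board orow ocol
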